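-- pv_equiv track=rewrite | github.com/scottXchoo/Algorithm-Problem-Solving | 프로그래머스/1/92334. 신고 결과 받기/신고 결과 받기.py | solution
-- ===== SOURCE A (Python) =====
-- from collections import defaultdict
--
-- def solution(id_list, report, k):
--     group = defaultdict(set)
--     count = defaultdict(int)
--     for key_value in report:
--         key, value = key_value.split(" ")
--         group[key].add(value)
--         count[(key, value)] = 1
--
--     cnts = defaultdict(int)
--     for key, value in count:
--         cnts[value] += 1
--
--     answer = []
--     for i in id_list:
--         cnt = 0
--         for j in group[i]:
--             if cnts[j] >= k:
--                 cnt += 1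
--         answer.append(cnt)
--
--     return answer
-- ===== SOURCE B (Python) =====
-- def solution(id_list, report, k):
--     # Direct nested-scan solution: no incremental dict/set bookkeeping. A reportee b is
--     # banned iff the number of distinct users that ever reported b (a fresh scan over all
--     # parsed pairs) reaches k; each id's mail count is the number of distinct banned
--     # reportees it reported.
--     pairs = [tuple(r.split(" ")) for r in report]
--     banned = {b for _, b in pairs if len({a for a, x in pairs if x == b}) >= k}
--     return [len({b for a, b in pairs if a == i and b in banned}) for i in id_list]
-- ===== Notes on version B (the rewrite author's own statement) =====
-- stated objective: simpler
-- what changed: Replaces A's incrementally built dict-of-sets/pair-dict/counter machinery and per-id loop by three direct declarative scans over the parsed pair list: a set comprehension of banned reportees (each checked by a fresh distinct-reporter scan) and a per-id set comprehension of banned reportees it reported, trading O(n^2) rescans for no auxiliary bookkeeping.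
import Mathlib
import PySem

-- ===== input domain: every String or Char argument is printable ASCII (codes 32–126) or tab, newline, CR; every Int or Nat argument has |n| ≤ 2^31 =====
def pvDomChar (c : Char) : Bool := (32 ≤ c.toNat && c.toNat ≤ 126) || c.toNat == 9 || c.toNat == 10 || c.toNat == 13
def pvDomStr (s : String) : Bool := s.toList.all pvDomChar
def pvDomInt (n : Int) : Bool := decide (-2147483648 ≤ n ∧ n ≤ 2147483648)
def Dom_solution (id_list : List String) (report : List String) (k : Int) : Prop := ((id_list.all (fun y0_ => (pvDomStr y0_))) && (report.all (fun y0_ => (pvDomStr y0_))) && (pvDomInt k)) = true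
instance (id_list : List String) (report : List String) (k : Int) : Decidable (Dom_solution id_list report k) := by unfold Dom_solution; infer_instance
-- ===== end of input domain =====

-- B replaces A's staged dict/set bookkeeping (group/count/cnts built incrementally, then a
-- per-id loop) by direct nested scans over the parsed pair list: a reportee is banned iff a
-- fresh scan finds >= k distinct reporters, and each id's answer is the size of the set of
-- banned reportees it reported (alternative decomposition; same results).


-- ===== PORT A =====
-- loop body of A's 'for key_value in report' loop over the (group, count) pair of dicts; the '_'
-- branch is where Python's 'key, value = key_value.split(" ")' raises ValueError — excluded by Pre_solution
def stepA (st : PySem.Dict String (PySem.Set String) × PySem.Dict (String × String) Int)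
    (key_value : String) :
    PySem.Dict String (PySem.Set String) × PySem.Dict (String × String) Int :=
  match PySem.Str.split? key_value " " with
  | some [key, value] =>
      (st.1.insert key (PySem.Set.add (st.1.getD key PySem.Set.empty) value),
       st.2.insert (key, value) 1)
  | _ => st

def solution (id_list : List String) (report : List String) (k : Int) : List Int :=
  let st := report.foldl stepA (PySem.Dict.empty, PySem.Dict.empty)
  let group := st.1
  let count := st.2
  let cnts := count.keys.foldl
    (fun (d : PySem.Dict String Int) kv => d.modify kv.2 0 (· + 1)) PySem.Dict.empty
  id_list.foldl (fun answer i =>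
    answer ++ [(group.getD i PySem.Set.empty).foldl
      (fun cnt j => if cnts.getD j 0 ≥ k then cnt + 1 else cnt) (0 : Int)]) []

-- ===== PORT B =====
-- B's 'pairs = [tuple(r.split(" ")) for r in report]'; the '_' branch is where B's later
-- 'for a, b in pairs' unpacking raises ValueError — excluded by Pre_solution
def parsePairs (report : List String) : List (String × String) :=
  report.foldl (fun acc r =>
    match PySem.Str.split? r " " with
    | some [a, b] => acc ++ [(a, b)]
    | _ => acc) []

def solution_alt (id_list : List String) (report : List String) (k : Int) : List Int :=
  let pairs := parsePairs report
  let banned : PySem.Set String := pairs.foldl (fun s p =>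
    if PySem.Set.len (PySem.Set.ofList ((pairs.filter (fun q => q.2 == p.2)).map (·.1))) ≥ k
    then PySem.Set.add s p.2 else s) PySem.Set.empty
  id_list.map (fun i =>
    PySem.Set.len (PySem.Set.ofList
      ((pairs.filter (fun q => q.1 == i && PySem.Set.contains banned q.2)).map (·.2))))

-- ===== PRECONDITION & SPEC =====
-- Both versions raise ValueError when some report entry does not split on " " into exactly two
-- pieces (A at 'key, value = key_value.split(" ")', B at unpacking); Pre_ excludes exactly those inputs.
def Pre_solution (id_list : List String) (report : List String) (k : Int) : Prop :=
  ∀ r ∈ report, ((PySem.Str.split? r " ").getD []).length = 2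
instance (id_list : List String) (report : List String) (k : Int) : Decidable (Pre_solution id_list report k) := by unfold Pre_solution; infer_instance
def pvWitness_solution : List String × List String × Int := (["muzi", "frodo"], ["muzi frodo", "frodo muzi", "muzi frodo"], 1)

def Spec_solution (id_list : List String) (report : List String) (k : Int) (out : List Int) : Prop := out = solution_alt id_list report k
instance (id_list : List String) (report : List String) (k : Int) (out : List Int) : Decidable (Spec_solution id_list report k out) := by unfold Spec_solution; infer_instance

-- ===== CLAIM (what is proved, stated in full; the proofs are below) =====
def Claim_equal_solution : Prop := ∀ (id_list : List String) (report : List String) (k : Int), Dom_solution id_list report k → Pre_solution id_list report k → Spec_solution id_list report k (solution id_list report k)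

-- ===== LEMMAS AND PROOFS =====

-- ghost accumulator (proof-only): the SET of parsed pairs, in first-insertion order
def stepGhost (s : PySem.Set (String × String)) (r : String) : PySem.Set (String × String) :=
  match PySem.Str.split? r " " with
  | some [a, b] => PySem.Set.add s (a, b)
  | _ => s

-- proof-only name for B's banned-set fold (definitionally B's 'banned')
def bannedOf (pairs : List (String × String)) (k : Int) : PySem.Set String :=
  pairs.foldl (fun s p =>
    if PySem.Set.len (PySem.Set.ofList ((pairs.filter (fun q => q.2 == p.2)).map (·.1))) ≥ k
    then PySem.Set.add s p.2 else s) PySem.Set.empty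

-- A's per-reporter set dict is the fibration of the deduped pair list by the reporter
def InvGC (group : PySem.Dict String (PySem.Set String)) (pairs : List (String × String)) : Prop :=
  ∀ key, group.getD key PySem.Set.empty = (pairs.filter (fun p => p.1 == key)).map (·.2)

lemma step_keys (g : PySem.Dict String (PySem.Set String)) (c : PySem.Dict (String × String) Int)
    (p : PySem.Set (String × String)) (r a b : String)
    (hr : PySem.Str.split? r " " = some [a, b]) (hkeys : c.keys = p) :
    (stepA (g, c) r).2.keys = stepGhost p r := by
  simp only [stepA, stepGhost, hr]
  rw [PySem.Set.add_eq_ite]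
  by_cases hm : (a, b) ∈ p
  · rw [PySem.Dict.keys_insert_of_contains, hkeys, if_pos hm]
    rw [PySem.Dict.contains_iff_mem_keys, hkeys]; exact hm
  · rw [PySem.Dict.keys_insert_of_not_contains, hkeys, if_neg hm]
    rw [PySem.Dict.contains_eq_decide_mem_keys, hkeys]
    simp [hm]

lemma step_inv (g : PySem.Dict String (PySem.Set String)) (c : PySem.Dict (String × String) Int)
    (p : PySem.Set (String × String)) (r a b : String)
    (hr : PySem.Str.split? r " " = some [a, b]) (hinv : InvGC g p) :
    InvGC (stepA (g, c) r).1 (stepGhost p r) := by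
  intro key
  simp only [stepA, stepGhost, hr]
  rw [PySem.Set.add_eq_ite]
  by_cases hk : key = a
  · subst hk
    rw [PySem.Dict.getD_insert_self, PySem.Set.add_eq_ite, hinv key]
    by_cases hm : (key, b) ∈ p
    · rw [if_pos hm, if_pos]
      simp only [List.mem_map, List.mem_filter]
      exact ⟨(key, b), ⟨hm, by simp⟩, rfl⟩
    · rw [if_neg hm, if_neg, List.filter_append, List.map_append]
      · simp
      · simp only [List.mem_map, List.mem_filter]
        rintro ⟨q, ⟨hq, hq1⟩, hq2⟩
        apply hm
        have : q = (key, b) := by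
          cases q; simp at hq1 hq2 ⊢; exact ⟨hq1, hq2⟩
        rwa [this] at hq
  · rw [PySem.Dict.getD_insert, if_neg hk, hinv key, PySem.Set.add_eq_ite]
    by_cases hm : (a, b) ∈ p
    · rw [if_pos hm]
    · rw [if_neg hm, List.filter_append, List.map_append]
      simp [Ne.symm hk]

lemma loop_inv : ∀ (report : List String),
    (∀ r ∈ report, ((PySem.Str.split? r " ").getD []).length = 2) →
    ∀ (st : PySem.Dict String (PySem.Set String) × PySem.Dict (String × String) Int)
      (p : PySem.Set (String × String)), st.2.keys = p → InvGC st.1 p →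
      (report.foldl stepA st).2.keys = report.foldl stepGhost p ∧
        InvGC (report.foldl stepA st).1 (report.foldl stepGhost p) := by
  intro report
  induction report with
  | nil => intro _ st p h1 h2; exact ⟨h1, h2⟩
  | cons r rs ih =>
    intro h st p h1 h2
    have hlen := h r (List.mem_cons_self)
    obtain ⟨a, b, hab⟩ : ∃ a b, PySem.Str.split? r " " = some [a, b] := by
      cases hs : PySem.Str.split? r " " with
      | none => rw [hs] at hlen; simp at hlen
      | some l =>
        rw [hs] at hlen
        obtain ⟨a, b, rfl⟩ := List.length_eq_two.mp (by simpa using hlen)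
        exact ⟨a, b, rfl⟩
    obtain ⟨g, c⟩ := st
    simp only [List.foldl_cons]
    exact ih (fun x hx => h x (List.mem_cons_of_mem _ hx)) _ _
      (step_keys g c p r a b hab h1) (step_inv g c p r a b hab h2)

-- the ghost set and B's parsed list have the same members
lemma mem_ghost_parse : ∀ (report : List String) (s : PySem.Set (String × String))
    (l : List (String × String)), (∀ q, q ∈ s ↔ q ∈ l) →
    ∀ q, q ∈ report.foldl stepGhost s ↔
      q ∈ report.foldl (fun acc r =>
        match PySem.Str.split? r " " with
        | some [a, b] => acc ++ [(a, b)]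
        | _ => acc) l := by
  intro report
  induction report with
  | nil => intro s l h q; exact h q
  | cons r rs ih =>
    intro s l h q
    simp only [List.foldl_cons]
    refine ih _ _ (fun q' => ?_) q
    unfold stepGhost
    cases hs : PySem.Str.split? r " " with
    | none => exact h q'
    | some parts =>
      match parts with
      | [] => exact h q'
      | [a] => exact h q'
      | [a, b] =>
        rw [PySem.Set.mem_add, List.mem_append, h q']
        simp [or_comm]
      | a :: b :: c :: rest => exact h q'

-- the ghost set stays duplicate-free
lemma nodup_ghost : ∀ (report : List String) (s : PySem.Set (String × String)),
    s.Nodup → (report.foldl stepGhost s).Nodup := by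
  intro report
  induction report with
  | nil => intro s h; exact h
  | cons r rs ih =>
    intro s h
    simp only [List.foldl_cons]
    apply ih
    unfold stepGhost
    cases hs : PySem.Str.split? r " " with
    | none => exact h
    | some parts =>
      match parts with
      | [] => exact h
      | [a] => exact h
      | [a, b] => exact PySem.Set.nodup_add _ _ h
      | a :: b :: c :: rest => exact h

-- membership in B's banned-set fold
lemma mem_banned_fold (c : String × String → Prop) [DecidablePred c] :
    ∀ (l : List (String × String)) (s : PySem.Set String) (x : String),
    x ∈ l.foldl (fun s p => if c p then PySem.Set.add s p.2 else s) s ↔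
      x ∈ s ∨ ∃ p ∈ l, p.2 = x ∧ c p := by
  intro l
  induction l with
  | nil => intro s x; simp
  | cons p ps ih =>
    intro s x
    simp only [List.foldl_cons]
    by_cases hc : c p
    · rw [if_pos hc, ih, PySem.Set.mem_add]
      constructor
      · rintro (⟨hx | rfl⟩ | ⟨q, hq, h2, h3⟩)
        · exact Or.inl hx
        · exact Or.inr ⟨p, List.mem_cons_self, rfl, hc⟩
        · exact Or.inr ⟨q, List.mem_cons_of_mem _ hq, h2, h3⟩
      · rintro (hx | ⟨q, hq, h2, h3⟩)
        · exact Or.inl (Or.inl hx)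
        · rcases List.mem_cons.mp hq with rfl | hq'
          · exact Or.inl (Or.inr h2.symm)
          · exact Or.inr ⟨q, hq', h2, h3⟩
    · rw [if_neg hc, ih]
      constructor
      · rintro (hx | ⟨q, hq, h2, h3⟩)
        · exact Or.inl hx
        · exact Or.inr ⟨q, List.mem_cons_of_mem _ hq, h2, h3⟩
      · rintro (hx | ⟨q, hq, h2, h3⟩)
        · exact Or.inl hx
        · rcases List.mem_cons.mp hq with rfl | hq'
          · exact absurd h3 hc
          · exact Or.inr ⟨q, hq', h2, h3⟩

-- distinct first components of the pairs with second component b, counted on any list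
-- with the same members as the nodup list dp
lemma distinct_fst_count (pairs dp : List (String × String)) (hnd : dp.Nodup)
    (hmem : ∀ q, q ∈ dp ↔ q ∈ pairs) (b : String) :
    (PySem.Set.ofList ((pairs.filter (fun q => q.2 == b)).map (·.1))).length
      = (dp.filter (fun q => q.2 == b)).length := by
  have h1 : ((dp.filter (fun q => q.2 == b)).map (·.1)).Nodup := by
    refine List.Nodup.map_on ?_ (hnd.filter _)
    intro x hx y hy hxy
    have hx2 := (List.mem_filter.mp hx).2
    have hy2 := (List.mem_filter.mp hy).2
    cases x; cases y
    simp_all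
  have h2 : (PySem.Set.ofList ((pairs.filter (fun q => q.2 == b)).map (·.1))).Perm
      ((dp.filter (fun q => q.2 == b)).map (·.1)) := by
    rw [List.perm_ext_iff_of_nodup (PySem.Set.nodup_ofList _) h1]
    intro a
    rw [PySem.Set.mem_ofList]
    simp only [List.mem_map, List.mem_filter]
    constructor
    · rintro ⟨q, ⟨hq, hq2⟩, rfl⟩; exact ⟨q, ⟨(hmem q).mpr hq, hq2⟩, rfl⟩
    · rintro ⟨q, ⟨hq, hq2⟩, rfl⟩; exact ⟨q, ⟨(hmem q).mp hq, hq2⟩, rfl⟩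
  rw [h2.length_eq, List.length_map]

-- ===== VERDICT (by name: the statement is the Claim_ definition above) =====
theorem solution_spec : Claim_equal_solution := by
  intro id_list report k _ hpre
  unfold Spec_solution solution
  have halt : solution_alt id_list report k = id_list.map (fun i =>
      PySem.Set.len (PySem.Set.ofList (((parsePairs report).filter
        (fun q => q.1 == i && PySem.Set.contains (bannedOf (parsePairs report) k) q.2)).map (·.2)))) := rfl
  rw [halt]
  obtain ⟨hkeys, hinv⟩ := loop_inv report hpre (PySem.Dict.empty, PySem.Dict.empty)
    PySem.Set.empty (by rw [PySem.Dict.keys_empty]; rfl)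
    (by intro key; simp [PySem.Dict.getD_empty, PySem.Set.empty])
  rw [PySem.List.foldl_append_singleton_eq_map, List.nil_append]
  set dp := report.foldl stepGhost PySem.Set.empty with hdp
  set pairs := parsePairs report with hpairs
  have hmem : ∀ q, q ∈ dp ↔ q ∈ pairs :=
    mem_ghost_parse report PySem.Set.empty [] (by intro q; simp [PySem.Set.empty])
  have hnd : dp.Nodup := nodup_ghost report PySem.Set.empty List.nodup_nil
  set cnts := (report.foldl stepA (PySem.Dict.empty, PySem.Dict.empty)).2.keys.foldl
    (fun (d : PySem.Dict String Int) kv => d.modify kv.2 0 (· + 1)) PySem.Dict.empty with hcnts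
  -- A's cnts[v] is the count of v among the second components of the deduped pairs
  have hA : ∀ v, cnts.getD v 0 = (((dp.filter (fun q => q.2 == v)).length : Nat) : Int) := by
    intro v
    rw [hcnts, hkeys, show (dp.foldl (fun (d : PySem.Dict String Int) kv => d.modify kv.2 0 (· + 1)) PySem.Dict.empty)
        = ((dp.map (·.2)).foldl (fun (d : PySem.Dict String Int) x => d.modify x 0 (· + 1)) PySem.Dict.empty) from (List.foldl_map (f := fun x : String × String => x.2) (g := fun (d : PySem.Dict String Int) x => d.modify x 0 (· + 1)) (l := dp) (init := PySem.Dict.empty)).symm,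
      PySem.Dict.getD_foldl_modify_add_one, PySem.Dict.getD_empty, zero_add,
      List.count_eq_countP, List.countP_map, List.countP_eq_length_filter]
    rfl
  -- B's ban condition, rewritten through the deduped pairs
  have hC : ∀ b, (PySem.Set.len (PySem.Set.ofList ((pairs.filter (fun q => q.2 == b)).map (·.1))) ≥ k)
      ↔ cnts.getD b 0 ≥ k := by
    intro b
    rw [hA]
    have := distinct_fst_count pairs dp hnd hmem b
    simp only [PySem.Set.len]
    omega
  -- membership in B's banned set, for reportees that occur
  have hban : ∀ b, b ∈ bannedOf pairs k ↔ (∃ p ∈ pairs, p.2 = b) ∧ cnts.getD b 0 ≥ k := by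
    intro b
    rw [bannedOf, mem_banned_fold
      (fun p => PySem.Set.len (PySem.Set.ofList ((pairs.filter (fun q => q.2 == p.2)).map (·.1))) ≥ k)]
    constructor
    · rintro (hb | ⟨p, hp, rfl, hc⟩)
      · simp [PySem.Set.empty] at hb
      · exact ⟨⟨p, hp, rfl⟩, (hC p.2).mp hc⟩
    · rintro ⟨⟨p, hp, rfl⟩, hc⟩
      exact Or.inr ⟨p, hp, rfl, (hC p.2).mpr hc⟩
  apply List.map_congr_left
  intro i _
  rw [hinv i, PySem.List.foldl_ite_add_one, zero_add, List.countP_eq_length_filter]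
  set G := (dp.filter (fun p => p.1 == i)).map (·.2) with hG
  have hGnd : G.Nodup := by
    refine List.Nodup.map_on ?_ (hnd.filter _)
    intro x hx y hy hxy
    have hx2 := (List.mem_filter.mp hx).2
    have hy2 := (List.mem_filter.mp hy).2
    cases x; cases y
    simp_all
  have hmemG : ∀ b, b ∈ G ↔ (i, b) ∈ dp := by
    intro b
    rw [hG]
    simp only [List.mem_map, List.mem_filter, beq_iff_eq]
    constructor
    · rintro ⟨q, ⟨hq, rfl⟩, rfl⟩; exact hq
    · intro hq; exact ⟨(i, b), ⟨hq, rfl⟩, rfl⟩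
  have hperm : (PySem.Set.ofList ((pairs.filter
      (fun q => q.1 == i && PySem.Set.contains (bannedOf pairs k) q.2)).map (·.2))).Perm
      (G.filter (fun x => decide (cnts.getD x 0 ≥ k))) := by
    rw [List.perm_ext_iff_of_nodup (PySem.Set.nodup_ofList _) (hGnd.filter _)]
    intro b
    rw [PySem.Set.mem_ofList, List.mem_filter, hmemG b]
    simp only [List.mem_map, List.mem_filter, Bool.and_eq_true, beq_iff_eq, decide_eq_true_eq]
    constructor
    · rintro ⟨q, ⟨hq, rfl, hb⟩, rfl⟩
      have hb' := (hban q.2).mp (by simpa [PySem.Set.contains_eq_listContains] using hb)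
      exact ⟨(hmem q).mpr hq, hb'.2⟩
    · rintro ⟨hq, hc⟩
      refine ⟨(i, b), ⟨(hmem (i, b)).mp hq, rfl, ?_⟩, rfl⟩
      have : b ∈ bannedOf pairs k := (hban b).mpr ⟨⟨(i, b), (hmem (i, b)).mp hq, rfl⟩, hc⟩
      simpa [PySem.Set.contains_eq_listContains] using this
  have hlen := hperm.length_eq
  simp only [PySem.Set.len]
  omega
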